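-- pv_equiv track=rewrite | github.com/aenealabs/aura | src/services/transform/architecture_reimaginer.py | _recommend_database_type
-- ===== SOURCE A (Python) =====
-- from enum import Enum
--
-- class DatabaseType(str, Enum):
--     """Database types."""
--
--     RELATIONAL = "relational"
--     DOCUMENT = "document"
--     KEY_VALUE = "key_value"
--     GRAPH = "graph"
--     TIME_SERIES = "time_series"
--     WIDE_COLUMN = "wide_column"
--     SEARCH = "search"
--
-- def _recommend_database_type(
--     entities: list[str], context_name: str
-- ) -> DatabaseType:
--     """Recommend database type for bounded context."""
--     # Simple heuristics
--     entity_names_lower = [e.lower() for e in entities]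
--
--     if any("transaction" in e or "order" in e for e in entity_names_lower):
--         return DatabaseType.RELATIONAL
--     elif any("log" in e or "event" in e for e in entity_names_lower):
--         return DatabaseType.TIME_SERIES
--     elif any("document" in e or "content" in e for e in entity_names_lower):
--         return DatabaseType.DOCUMENT
--     elif any("session" in e or "cache" in e for e in entity_names_lower):
--         return DatabaseType.KEY_VALUE
--     elif any("relationship" in e or "graph" in e for e in entity_names_lower):
--         return DatabaseType.GRAPH
--
--     return DatabaseType.RELATIONAL
-- ===== SOURCE B (Python) =====
-- from enum import Enum
--
-- class DatabaseType(str, Enum):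
--     """Database types."""
--
--     RELATIONAL = "relational"
--     DOCUMENT = "document"
--     KEY_VALUE = "key_value"
--     GRAPH = "graph"
--     TIME_SERIES = "time_series"
--     WIDE_COLUMN = "wide_column"
--     SEARCH = "search"
--
-- # Priority-ordered rules: lower index = higher priority.
-- _RULES = [
--     (("transaction", "order"), DatabaseType.RELATIONAL),
--     (("log", "event"), DatabaseType.TIME_SERIES),
--     (("document", "content"), DatabaseType.DOCUMENT),
--     (("session", "cache"), DatabaseType.KEY_VALUE),
--     (("relationship", "graph"), DatabaseType.GRAPH),
-- ]
--
-- def _recommend_database_type(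
--     entities: list[str], context_name: str
-- ) -> DatabaseType:
--     """Recommend database type for bounded context."""
--     best = len(_RULES)
--     for e in entities:
--         el = e.lower()
--         for i, (keywords, _db) in enumerate(_RULES):
--             if i < best and any(k in el for k in keywords):
--                 best = i
--                 break
--     return _RULES[best][1] if best < len(_RULES) else DatabaseType.RELATIONAL
-- ===== Notes on version B (the rewrite author's own statement) =====
-- stated objective: alternative
-- what changed: Replaced the five separate any()-scans over the entity list by one data-driven pass: a priority-ordered rule table is scanned once per entity while a running minimum rule index is kept, and the table entry at the final minimum (or the RELATIONAL default) is returned.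
import Mathlib
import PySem

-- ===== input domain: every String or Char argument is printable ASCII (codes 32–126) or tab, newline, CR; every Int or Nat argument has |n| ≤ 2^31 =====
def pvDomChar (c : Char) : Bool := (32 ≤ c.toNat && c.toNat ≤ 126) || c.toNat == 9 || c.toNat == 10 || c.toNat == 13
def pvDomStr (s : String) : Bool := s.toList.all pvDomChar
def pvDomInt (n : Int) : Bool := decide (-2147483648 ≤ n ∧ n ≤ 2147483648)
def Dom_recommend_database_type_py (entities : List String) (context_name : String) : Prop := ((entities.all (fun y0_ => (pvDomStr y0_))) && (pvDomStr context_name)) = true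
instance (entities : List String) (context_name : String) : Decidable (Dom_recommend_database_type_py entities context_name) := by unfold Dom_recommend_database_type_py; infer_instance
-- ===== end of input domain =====

-- B replaces A's chain of five any()-scans by a data-driven rule table and one pass
-- keeping a running minimum rule index (alternative decomposition, same cost).


-- ===== PORT A =====
def recommend_database_type_py (entities : List String) (context_name : String) : String :=
  let entity_names_lower := entities.map (fun e => PySem.Str.lower e)
  if entity_names_lower.any (fun e => PySem.Str.isIn "transaction" e || PySem.Str.isIn "order" e) then
    "relational"
  else if entity_names_lower.any (fun e => PySem.Str.isIn "log" e || PySem.Str.isIn "event" e) then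
    "time_series"
  else if entity_names_lower.any (fun e => PySem.Str.isIn "document" e || PySem.Str.isIn "content" e) then
    "document"
  else if entity_names_lower.any (fun e => PySem.Str.isIn "session" e || PySem.Str.isIn "cache" e) then
    "key_value"
  else if entity_names_lower.any (fun e => PySem.Str.isIn "relationship" e || PySem.Str.isIn "graph" e) then
    "graph"
  else
    "relational"

-- ===== PORT B =====
-- the priority-ordered rule table of Source B
def pvRules : List ((String × String) × String) :=
  [(("transaction", "order"), "relational"),
   (("log", "event"), "time_series"),
   (("document", "content"), "document"),
   (("session", "cache"), "key_value"),
   (("relationship", "graph"), "graph")]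

-- inner loop of Source B: first rule index i < best whose keywords match el, else best
def pvInnerGo (el : String) (best : Nat) : List ((String × String) × String) → Nat → Nat
  | [], _ => best
  | r :: rs, i =>
    if i < best ∧ (PySem.Str.isIn r.1.1 el || PySem.Str.isIn r.1.2 el) = true then i
    else pvInnerGo el best rs (i + 1)

def pvInner (el : String) (best : Nat) : Nat := pvInnerGo el best pvRules 0

def recommend_database_type_py_alt (entities : List String) (context_name : String) : String :=
  let best := entities.foldl (fun b e => pvInner (PySem.Str.lower e) b) pvRules.length
  match pvRules[best]? with
  | some r => r.2
  | none => "relational"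

-- ===== PRECONDITION & SPEC =====
def Spec_recommend_database_type_py (entities : List String) (context_name : String) (out : String) : Prop := out = recommend_database_type_py_alt entities context_name
instance (entities : List String) (context_name : String) (out : String) : Decidable (Spec_recommend_database_type_py entities context_name out) := by unfold Spec_recommend_database_type_py; infer_instance

-- ===== CLAIM (what is proved, stated in full; the proofs are below) =====
def Claim_equal_recommend_database_type_py : Prop := ∀ (entities : List String) (context_name : String), Dom_recommend_database_type_py entities context_name → Spec_recommend_database_type_py entities context_name (recommend_database_type_py entities context_name)

-- ===== LEMMAS AND PROOFS =====

-- match index of a lowered entity name: the first rule it matches, 5 if none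
def pvM (el : String) : Nat :=
  if PySem.Str.isIn "transaction" el || PySem.Str.isIn "order" el then 0
  else if PySem.Str.isIn "log" el || PySem.Str.isIn "event" el then 1
  else if PySem.Str.isIn "document" el || PySem.Str.isIn "content" el then 2
  else if PySem.Str.isIn "session" el || PySem.Str.isIn "cache" el then 3
  else if PySem.Str.isIn "relationship" el || PySem.Str.isIn "graph" el then 4
  else 5

-- minimum match index over a list of entities
def pvBest : List String → Nat
  | [] => 5
  | e :: t => min (pvM (PySem.Str.lower e)) (pvBest t)

theorem pvBest_le (t : List String) : pvBest t ≤ 5 := by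
  induction t with
  | nil => simp [pvBest]
  | cons e t ih => simp [pvBest]; omega

-- pure-Bool shape of the inner loop vs the match index, closed by decide
theorem pvInnerShape (b : Nat) (hb : b ≤ 5) (p0 p1 p2 p3 p4 : Bool) :
    (if 0 < b ∧ p0 = true then 0
     else if 0 + 1 < b ∧ p1 = true then 0 + 1
     else if 0 + 1 + 1 < b ∧ p2 = true then 0 + 1 + 1
     else if 0 + 1 + 1 + 1 < b ∧ p3 = true then 0 + 1 + 1 + 1
     else if 0 + 1 + 1 + 1 + 1 < b ∧ p4 = true then 0 + 1 + 1 + 1 + 1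
     else b) =
    min b (if p0 then 0 else if p1 then 1 else if p2 then 2 else if p3 then 3 else if p4 then 4 else 5) := by
  interval_cases b <;> revert p0 p1 p2 p3 p4 <;> decide

theorem pvInner_eq_min (el : String) (b : Nat) (hb : b ≤ 5) : pvInner el b = min b (pvM el) := by
  simp only [pvInner, pvRules, pvM, pvInnerGo]
  exact pvInnerShape b hb _ _ _ _ _

theorem foldl_pvInner (t : List String) (b : Nat) (hb : b ≤ 5) :
    t.foldl (fun b e => pvInner (PySem.Str.lower e) b) b = min b (pvBest t) := by
  induction t generalizing b with
  | nil => simp [pvBest]; omega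
  | cons e t ih =>
    rw [List.foldl_cons, ih _ (by rw [pvInner_eq_min _ _ hb]; omega), pvInner_eq_min _ _ hb]
    simp only [pvBest]
    omega

-- pure-Bool shape of min of two priority chains, closed by decide
theorem pvMinChain (p0 p1 p2 p3 p4 a0 a1 a2 a3 a4 : Bool) :
    min (if p0 then 0 else if p1 then 1 else if p2 then 2 else if p3 then 3 else if p4 then 4 else 5)
        (if a0 then 0 else if a1 then 1 else if a2 then 2 else if a3 then 3 else if a4 then 4 else 5) =
    (if (p0 || a0) then 0 else if (p1 || a1) then 1 else if (p2 || a2) then 2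
     else if (p3 || a3) then 3 else if (p4 || a4) then 4 else 5) := by
  revert p0 p1 p2 p3 p4 a0 a1 a2 a3 a4; decide

theorem pvBest_cons_chain (t : List String) :
    pvBest t =
      (if t.any (fun e => PySem.Str.isIn "transaction" (PySem.Str.lower e) || PySem.Str.isIn "order" (PySem.Str.lower e)) then 0
       else if t.any (fun e => PySem.Str.isIn "log" (PySem.Str.lower e) || PySem.Str.isIn "event" (PySem.Str.lower e)) then 1
       else if t.any (fun e => PySem.Str.isIn "document" (PySem.Str.lower e) || PySem.Str.isIn "content" (PySem.Str.lower e)) then 2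
       else if t.any (fun e => PySem.Str.isIn "session" (PySem.Str.lower e) || PySem.Str.isIn "cache" (PySem.Str.lower e)) then 3
       else if t.any (fun e => PySem.Str.isIn "relationship" (PySem.Str.lower e) || PySem.Str.isIn "graph" (PySem.Str.lower e)) then 4
       else 5) := by
  induction t with
  | nil => simp [pvBest]
  | cons e t ih =>
    simp only [pvBest, pvM, List.any_cons, ih]
    exact pvMinChain _ _ _ _ _ _ _ _ _ _

-- ===== VERDICT (by name: the statement is the Claim_ definition above) =====
theorem recommend_database_type_py_spec : Claim_equal_recommend_database_type_py := by
  intro entities context_name _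
  unfold Spec_recommend_database_type_py recommend_database_type_py recommend_database_type_py_alt
  rw [show pvRules.length = 5 from rfl, foldl_pvInner entities 5 (by omega)]
  rw [Nat.min_eq_right (pvBest_le entities), pvBest_cons_chain]
  simp only [List.any_map, Function.comp_def]
  split_ifs <;> rfl
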